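-- pv_equiv track=rewrite | github.com/juhinebhnani4/LDIP | backend/app/core/cache_control.py | match_path_pattern
-- ===== SOURCE A (Python) =====
-- def match_path_pattern(path: str, pattern: str) -> bool:
--     """Check if path matches pattern with {param} placeholders."""
--     path_parts = path.strip("/").split("/")
--     pattern_parts = pattern.strip("/").split("/")
--
--     if len(path_parts) != len(pattern_parts):
--         return False
--
--     for path_part, pattern_part in zip(path_parts, pattern_parts, strict=False):
--         if pattern_part.startswith("{") and pattern_part.endswith("}"):
--             # Parameter placeholder - matches anything
--             continue
--         if path_part != pattern_part:
--             return False
--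
--     return True
-- ===== SOURCE B (Python) =====
-- def match_path_pattern(path: str, pattern: str) -> bool:
--     """Check if path matches pattern with {param} placeholders."""
--     def go(ps, qs):
--         if not ps and not qs:
--             return True
--         if not ps or not qs:
--             return False
--         q = qs[0]
--         if (q.startswith("{") and q.endswith("}")) or ps[0] == q:
--             return go(ps[1:], qs[1:])
--         return False
--     return go(path.strip("/").split("/"), pattern.strip("/").split("/"))
-- ===== Notes on version B (the rewrite author's own statement) =====
-- stated objective: alternative
-- what changed: Replaces the up-front length check plus zip loop with a single structural recursion over both segment lists at once, detecting a length mismatch where one list runs out.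
import Mathlib
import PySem

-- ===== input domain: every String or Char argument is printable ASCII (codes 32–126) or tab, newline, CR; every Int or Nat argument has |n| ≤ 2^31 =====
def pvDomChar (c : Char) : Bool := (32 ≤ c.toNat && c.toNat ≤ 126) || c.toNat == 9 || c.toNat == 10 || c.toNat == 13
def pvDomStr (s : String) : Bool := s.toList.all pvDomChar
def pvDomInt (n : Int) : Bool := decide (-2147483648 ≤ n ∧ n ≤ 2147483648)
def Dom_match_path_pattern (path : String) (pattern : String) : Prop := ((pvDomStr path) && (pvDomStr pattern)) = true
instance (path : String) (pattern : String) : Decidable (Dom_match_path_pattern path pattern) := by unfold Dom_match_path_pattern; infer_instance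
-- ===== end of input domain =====

-- B replaces A's up-front length check plus zip loop by one structural recursion over
-- both segment lists at once (alternative decomposition; same cost).

-- ===== PORT A =====
-- the for-loop over zip(path_parts, pattern_parts), with early return False
def mppLoopA : List (String × String) → Bool
  | [] => true
  | (path_part, pattern_part) :: rest =>
    if PySem.Str.startswith pattern_part "{" && PySem.Str.endswith pattern_part "}" then
      mppLoopA rest
    else if path_part ≠ pattern_part then false
    else mppLoopA rest

def match_path_pattern (path : String) (pattern : String) : Bool :=
  let path_parts : List String := (PySem.Chars.splitOn (PySem.Str.stripChars path "/").toList ['/']).map String.ofList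
  let pattern_parts : List String := (PySem.Chars.splitOn (PySem.Str.stripChars pattern "/").toList ['/']).map String.ofList
  if path_parts.length ≠ pattern_parts.length then false
  else mppLoopA (path_parts.zip pattern_parts)

-- ===== PORT B =====
-- the recursive helper go(ps, qs) from Source B
def mppGo : List String → List String → Bool
  | [], [] => true
  | [], _ :: _ => false
  | _ :: _, [] => false
  | p :: ps, q :: qs =>
    if (PySem.Str.startswith q "{" && PySem.Str.endswith q "}") || p == q then mppGo ps qs
    else false

def match_path_pattern_alt (path : String) (pattern : String) : Bool :=
  mppGo ((PySem.Chars.splitOn (PySem.Str.stripChars path "/").toList ['/']).map String.ofList)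
        ((PySem.Chars.splitOn (PySem.Str.stripChars pattern "/").toList ['/']).map String.ofList)

-- ===== PRECONDITION & SPEC =====
def Spec_match_path_pattern (path : String) (pattern : String) (out : Bool) : Prop := out = match_path_pattern_alt path pattern
instance (path : String) (pattern : String) (out : Bool) : Decidable (Spec_match_path_pattern path pattern out) := by unfold Spec_match_path_pattern; infer_instance

-- ===== CLAIM (what is proved, stated in full; the proofs are below) =====
def Claim_equal_match_path_pattern : Prop := ∀ (path : String) (pattern : String), Dom_match_path_pattern path pattern → Spec_match_path_pattern path pattern (match_path_pattern path pattern)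

-- ===== LEMMAS AND PROOFS =====
theorem mppGo_eq (ps : List String) (qs : List String) :
    mppGo ps qs = ((ps.length = qs.length : Bool) && mppLoopA (ps.zip qs)) := by
  induction ps generalizing qs with
  | nil => cases qs <;> simp [mppGo, mppLoopA]
  | cons p ps ih =>
    cases qs with
    | nil => simp [mppGo]
    | cons q qs =>
      simp only [mppGo, mppLoopA, List.zip_cons_cons, List.length_cons, ih]
      by_cases h1 : PySem.Chars.startswith q.toList ['{'] = true
      · by_cases h2 : PySem.Chars.endswith q.toList ['}'] = true
        · simp [h1, h2]
        · by_cases hpq : p = q <;> simp [h1, h2, hpq]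
      · by_cases hpq : p = q <;> simp [h1, hpq]

-- ===== VERDICT (by name: the statement is the Claim_ definition above) =====
theorem match_path_pattern_spec : Claim_equal_match_path_pattern := by
  intro path pattern _
  unfold Spec_match_path_pattern match_path_pattern match_path_pattern_alt
  simp only [mppGo_eq]
  split_ifs with h
  · have h' : ¬ (PySem.Chars.splitOn (PySem.Chars.stripChars path.toList ['/']) ['/']).length =
        (PySem.Chars.splitOn (PySem.Chars.stripChars pattern.toList ['/']) ['/']).length := by
      rw [List.length_map, List.length_map] at h
      simpa using h
    simp [h']
  · have h' : (PySem.Chars.splitOn (PySem.Chars.stripChars path.toList ['/']) ['/']).length =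
        (PySem.Chars.splitOn (PySem.Chars.stripChars pattern.toList ['/']) ['/']).length := by
      rw [List.length_map, List.length_map, not_not] at h
      simpa using h
    simp [h']
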